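-- pv_equiv track=rewrite | github.com/BrucePlissken/PlanningMain | StoryTeller.py | curve_merger
-- ===== SOURCE A (Python) =====
-- def curve_merger(curves):
--     x = [0]
--     y = [0]
--     for curve in curves:
--         curve[1].pop(0)
--         curve[0].pop(0)
--         for t in curve[0]:
--             x.append(x[len(x) -1] + t)
--         for v in curve[1]:
--             y.append(y[len(y) -1] + v)
--
--     result = (x,y)
--     return result
-- ===== SOURCE B (Python) =====
-- def curve_merger(curves):
--     # pass 1: flatten (performing the same pop(0) mutations as the original)
--     all_t = []
--     all_v = []
--     for curve in curves:
--         curve[1].pop(0)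
--         curve[0].pop(0)
--         all_t.extend(curve[0])
--         all_v.extend(curve[1])
--     # pass 2: one cumulative-sum scan per axis
--     def prefix(ds):
--         out = [0]
--         s = 0
--         for d in ds:
--             s += d
--             out.append(s)
--         return out
--     return (prefix(all_t), prefix(all_v))
-- ===== Notes on version B (the rewrite author's own statement) =====
-- stated objective: alternative
-- what changed: Replaces the per-curve interleaved append loops that re-index the last element with a flatten pass collecting all deltas followed by a single cumulative-sum scan per axis (B performs the same pop(0) mutations as A).
import Mathlib
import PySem

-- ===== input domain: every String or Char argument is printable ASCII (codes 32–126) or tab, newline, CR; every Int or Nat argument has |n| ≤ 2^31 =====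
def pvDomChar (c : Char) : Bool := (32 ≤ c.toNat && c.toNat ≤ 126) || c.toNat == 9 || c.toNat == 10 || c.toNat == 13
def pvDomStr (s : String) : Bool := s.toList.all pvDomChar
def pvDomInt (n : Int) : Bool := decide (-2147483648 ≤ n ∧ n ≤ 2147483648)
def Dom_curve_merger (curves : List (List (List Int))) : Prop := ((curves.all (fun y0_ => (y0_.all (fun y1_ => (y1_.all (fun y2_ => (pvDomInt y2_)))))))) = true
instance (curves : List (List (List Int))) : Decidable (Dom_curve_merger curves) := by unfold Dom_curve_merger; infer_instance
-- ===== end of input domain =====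

-- B flattens all deltas first and then does one cumulative-sum scan per axis,
-- instead of A's per-curve interleaved append loops; same cost, different decomposition.
-- Both A and B pop(0) from each curve's sublists in place; the mutation is identical,
-- the equivalence proved here is about the return value.

-- ===== PORT A =====
-- x[len(x)-1]: x is always nonempty (starts as [0]), so it is the last element.
def cmLastD (l : List Int) : Int := (l.getLast?).getD 0

def curve_merger (curves : List (List (List Int))) : List Int × List Int :=
  curves.foldl (fun (st : List Int × List Int) curve =>
    -- curve[1].pop(0); curve[0].pop(0)  (Pre_ excludes the inputs where pop/indexing raises)
    let c1 := ((PySem.List.pyGet? curve 1).getD []).drop 1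
    let c0 := ((PySem.List.pyGet? curve 0).getD []).drop 1
    let x := c0.foldl (fun acc t => acc ++ [cmLastD acc + t]) st.1
    let y := c1.foldl (fun acc v => acc ++ [cmLastD acc + v]) st.2
    (x, y)) ([0], [0])

-- ===== PORT B =====
-- prefix: one cumulative-sum scan, carrying the running total s
def cmPrefix (ds : List Int) : List Int :=
  (ds.foldl (fun (p : List Int × Int) d => (p.1 ++ [p.2 + d], p.2 + d)) ([0], 0)).1

def curve_merger_alt (curves : List (List (List Int))) : List Int × List Int :=
  let fl := curves.foldl (fun (p : List Int × List Int) curve =>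
    (p.1 ++ ((PySem.List.pyGet? curve 0).getD []).drop 1,
     p.2 ++ ((PySem.List.pyGet? curve 1).getD []).drop 1)) ([], [])
  (cmPrefix fl.1, cmPrefix fl.2)

-- ===== PRECONDITION & SPEC =====
-- Pre_ excludes exactly the inputs where A raises IndexError: a curve with fewer than
-- two sublists (curve[1] indexing) or with an empty first or second sublist (pop(0)).
def Pre_curve_merger (curves : List (List (List Int))) : Prop :=
  ∀ c ∈ curves, 2 ≤ c.length ∧ c.getD 0 [] ≠ [] ∧ c.getD 1 [] ≠ []
instance (curves : List (List (List Int))) : Decidable (Pre_curve_merger curves) := by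
  unfold Pre_curve_merger; infer_instance
def pvWitness_curve_merger : List (List (List Int)) := [[[0, 1, 2], [0, 3, 4]], [[5], [6]]]

def Spec_curve_merger (curves : List (List (List Int))) (out : List Int × List Int) : Prop := out = curve_merger_alt curves
instance (curves : List (List (List Int))) (out : List Int × List Int) : Decidable (Spec_curve_merger curves out) := by unfold Spec_curve_merger; infer_instance

-- ===== CLAIM (what is proved, stated in full; the proofs are below) =====
def Claim_equal_curve_merger : Prop := ∀ (curves : List (List (List Int))), Dom_curve_merger curves → Pre_curve_merger curves → Spec_curve_merger curves (curve_merger curves)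

-- ===== LEMMAS AND PROOFS =====

-- the cumulative-sum scan starting from running total s, with empty output accumulator
def cmScan (s : Int) (ds : List Int) : List Int × Int :=
  ds.foldl (fun (p : List Int × Int) d => (p.1 ++ [p.2 + d], p.2 + d)) ([], s)

lemma cmScan_shift (ds : List Int) : ∀ (l : List Int) (s : Int),
    ds.foldl (fun (p : List Int × Int) d => (p.1 ++ [p.2 + d], p.2 + d)) (l, s)
      = (l ++ (cmScan s ds).1, (cmScan s ds).2) := by
  induction ds with
  | nil => intro l s; simp [cmScan]
  | cons d ds ih =>
    intro l s
    simp only [List.foldl_cons, cmScan, List.nil_append] at *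
    rw [ih (l ++ [s + d]) (s + d), ih [s + d] (s + d)]
    simp

lemma cmScan_append (a b : List Int) (s : Int) :
    cmScan s (a ++ b) = ((cmScan s a).1 ++ (cmScan (cmScan s a).2 b).1,
                         (cmScan (cmScan s a).2 b).2) := by
  unfold cmScan
  rw [List.foldl_append]
  have := cmScan_shift b (cmScan s a).1 (cmScan s a).2
  unfold cmScan at this
  rw [this]

lemma cmInner_eq (ts : List Int) : ∀ (x : List Int),
    ts.foldl (fun acc t => acc ++ [cmLastD acc + t]) x
      = x ++ (cmScan (cmLastD x) ts).1 := by
  induction ts with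
  | nil => intro x; simp [cmScan]
  | cons t ts ih =>
    intro x
    have hl : cmLastD (x ++ [cmLastD x + t]) = cmLastD x + t := by
      simp [cmLastD]
    simp only [List.foldl_cons]
    rw [ih (x ++ [cmLastD x + t]), hl]
    rw [show cmScan (cmLastD x) (t :: ts)
          = ([cmLastD x + t] ++ (cmScan (cmLastD x + t) ts).1,
             (cmScan (cmLastD x + t) ts).2) from by
      unfold cmScan
      simp only [List.foldl_cons, List.nil_append]
      exact cmScan_shift ts [cmLastD x + t] (cmLastD x + t)]
    simp

lemma cmLastD_append_scan (ts : List Int) : ∀ (x : List Int) (s : Int),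
    cmLastD x = s → cmLastD (x ++ (cmScan s ts).1) = (cmScan s ts).2 := by
  induction ts with
  | nil => intro x s h; simpa [cmScan] using h
  | cons t ts ih =>
    intro x s h
    rw [show cmScan s (t :: ts)
          = ([s + t] ++ (cmScan (s + t) ts).1, (cmScan (s + t) ts).2) from by
      unfold cmScan
      simp only [List.foldl_cons, List.nil_append]
      exact cmScan_shift ts [s + t] (s + t)]
    rw [show x ++ ([s + t] ++ (cmScan (s + t) ts).1)
          = (x ++ [s + t]) ++ (cmScan (s + t) ts).1 from by simp]
    exact ih (x ++ [s + t]) (s + t) (by simp [cmLastD])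

-- the flatten fold of B computed componentwise
lemma cmFlatten_eq (curves : List (List (List Int))) : ∀ (a b : List Int),
    curves.foldl (fun (p : List Int × List Int) curve =>
      (p.1 ++ ((PySem.List.pyGet? curve 0).getD []).drop 1,
       p.2 ++ ((PySem.List.pyGet? curve 1).getD []).drop 1)) (a, b)
    = (a ++ curves.flatMap (fun c => ((PySem.List.pyGet? c 0).getD []).drop 1),
       b ++ curves.flatMap (fun c => ((PySem.List.pyGet? c 1).getD []).drop 1)) := by
  induction curves with
  | nil => intro a b; simp
  | cons c cs ih => intro a b; simp only [List.foldl_cons]; rw [ih]; simp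

-- A's outer fold computed as scans of the flattened deltas
lemma cmMain (curves : List (List (List Int))) : ∀ (x y : List Int),
    curves.foldl (fun (st : List Int × List Int) curve =>
      let c1 := ((PySem.List.pyGet? curve 1).getD []).drop 1
      let c0 := ((PySem.List.pyGet? curve 0).getD []).drop 1
      (c0.foldl (fun acc t => acc ++ [cmLastD acc + t]) st.1,
       c1.foldl (fun acc v => acc ++ [cmLastD acc + v]) st.2)) (x, y)
    = (x ++ (cmScan (cmLastD x) (curves.flatMap (fun c => ((PySem.List.pyGet? c 0).getD []).drop 1))).1,
       y ++ (cmScan (cmLastD y) (curves.flatMap (fun c => ((PySem.List.pyGet? c 1).getD []).drop 1))).1) := by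
  induction curves with
  | nil => intro x y; simp [cmScan]
  | cons c cs ih =>
    intro x y
    simp only [List.foldl_cons, List.flatMap_cons]
    rw [ih, cmInner_eq, cmInner_eq]
    rw [cmScan_append, cmScan_append]
    rw [cmLastD_append_scan _ x (cmLastD x) rfl,
        cmLastD_append_scan _ y (cmLastD y) rfl]
    simp

-- ===== VERDICT (by name: the statement is the Claim_ definition above) =====
theorem curve_merger_spec : Claim_equal_curve_merger := by
  intro curves _ _
  unfold Spec_curve_merger curve_merger curve_merger_alt
  rw [cmMain, cmFlatten_eq]
  simp only [cmPrefix, List.nil_append]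
  rw [cmScan_shift _ [0] 0, cmScan_shift _ [0] 0]
  simp [cmLastD]
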